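-- pv_equiv track=rewrite | github.com/PPCavallera/Hierarchical-Subgraph-Centric-Learning | lib/get_data_windmill_lstm.py | reprocess_adjacency_matrix
-- ===== SOURCE A (Python) =====
-- def reprocess_adjacency_matrix(A, c, cluster_id):
--     li = []
--     ind = []
--     for i, v in enumerate(c):
--         if v == cluster_id:
--             ind.append(i)
--             for j, e in enumerate(A[i]):
--                 if j >= i and c[j] == cluster_id and e == 1:
--                     li.append([i, j])
--     for l in li:
--         l[0] = ind.index(l[0])
--         l[1] = ind.index(l[1])
--     return li
-- ===== SOURCE B (Python) =====
-- def reprocess_adjacency_matrix(A, c, cluster_id):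
--     # Build cluster member list once, then walk member pairs directly in
--     # cluster-local coordinates: no remap pass, inner loop over members only.
--     ind = [i for i, v in enumerate(c) if v == cluster_id]
--     li = []
--     for a, i in enumerate(ind):
--         row = A[i]
--         for b in range(a, len(ind)):
--             j = ind[b]
--             if j < len(row) and row[j] == 1:
--                 li.append([a, b])
--     return li
-- ===== Notes on version B (the rewrite author's own statement) =====
-- stated objective: simpler
-- what changed: B builds the cluster member list first and walks member pairs directly in cluster-local coordinates (inner loop over cluster members only), eliminating A's full-row column scan and its whole second remap pass with repeated list.index calls.
import Mathlib
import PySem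

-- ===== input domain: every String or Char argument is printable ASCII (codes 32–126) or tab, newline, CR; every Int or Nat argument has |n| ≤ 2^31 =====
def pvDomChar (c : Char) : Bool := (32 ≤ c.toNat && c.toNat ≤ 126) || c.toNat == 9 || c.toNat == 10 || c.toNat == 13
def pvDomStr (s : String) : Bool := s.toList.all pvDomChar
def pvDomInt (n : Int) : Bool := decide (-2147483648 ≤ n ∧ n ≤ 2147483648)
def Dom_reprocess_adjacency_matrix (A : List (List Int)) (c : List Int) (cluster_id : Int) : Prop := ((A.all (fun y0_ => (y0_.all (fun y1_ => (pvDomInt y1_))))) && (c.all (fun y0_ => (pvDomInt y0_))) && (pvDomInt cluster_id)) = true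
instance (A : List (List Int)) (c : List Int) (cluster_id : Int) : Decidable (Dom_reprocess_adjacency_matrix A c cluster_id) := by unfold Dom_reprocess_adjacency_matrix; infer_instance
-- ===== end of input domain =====

-- B builds the cluster member list first and emits edges directly in cluster-local
-- coordinates (inner loop over cluster members only), removing A's full-row scan and
-- its whole second remap pass; objective: simpler.

-- ===== PORT A =====
def reprocess_adjacency_matrix (A : List (List Int)) (c : List Int) (cluster_id : Int) : List (List Int) :=
  let st := (PySem.List.enumerate c).foldl
    (fun (st : List (List Int) × List Int) iv =>
      if iv.2 == cluster_id then
        let row := PySem.List.pyGetD A iv.1 []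
        let li := (PySem.List.enumerate row).foldl
          (fun li je =>
            if decide (je.1 ≥ iv.1) && (PySem.List.pyGetD c je.1 0 == cluster_id) && (je.2 == 1)
            then li ++ [[iv.1, je.1]] else li) st.1
        (li, st.2 ++ [iv.1])
      else st)
    ([], [])
  st.1.map (fun l =>
    [(((PySem.List.index? st.2 (PySem.List.pyGetD l 0 0)).getD 0 : Nat) : Int),
     (((PySem.List.index? st.2 (PySem.List.pyGetD l 1 0)).getD 0 : Nat) : Int)])

-- ===== PORT B =====
def reprocess_adjacency_matrix_alt (A : List (List Int)) (c : List Int) (cluster_id : Int) : List (List Int) :=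
  let ind := ((PySem.List.enumerate c).filter (fun iv => iv.2 == cluster_id)).map (fun iv => iv.1)
  (PySem.List.enumerate ind).foldl
    (fun li ai =>
      let row := PySem.List.pyGetD A ai.2 []
      (PySem.List.pyRange ai.1 (PySem.List.len ind) 1).foldl
        (fun li b =>
          let j := PySem.List.pyGetD ind b 0
          if decide (j < PySem.List.len row) && (PySem.List.pyGetD row j 0 == 1)
          then li ++ [[ai.1, b]] else li) li)
    []

-- ===== PRECONDITION & SPEC =====
-- Pre_ excludes exactly the inputs where Python A raises IndexError: a cluster index i
-- with i ≥ len(A) (A[i]), or a cluster row reaching past len(c) (c[j]).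
def Pre_reprocess_adjacency_matrix (A : List (List Int)) (c : List Int) (cluster_id : Int) : Prop :=
  ∀ i : Nat, i < c.length → c.getD i 0 = cluster_id →
    i < A.length ∧ (A.getD i []).length ≤ c.length
instance (A : List (List Int)) (c : List Int) (cluster_id : Int) : Decidable (Pre_reprocess_adjacency_matrix A c cluster_id) := by unfold Pre_reprocess_adjacency_matrix; infer_instance
def pvWitness_reprocess_adjacency_matrix : List (List Int) × List Int × Int := ([[1, 0], [1, 1]], [0, 0], 0)

def Spec_reprocess_adjacency_matrix (A : List (List Int)) (c : List Int) (cluster_id : Int) (out : List (List Int)) : Prop := out = reprocess_adjacency_matrix_alt A c cluster_id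
instance (A : List (List Int)) (c : List Int) (cluster_id : Int) (out : List (List Int)) : Decidable (Spec_reprocess_adjacency_matrix A c cluster_id out) := by unfold Spec_reprocess_adjacency_matrix; infer_instance

-- ===== CLAIM (what is proved, stated in full; the proofs are below) =====
def Claim_equal_reprocess_adjacency_matrix : Prop := ∀ (A : List (List Int)) (c : List Int) (cluster_id : Int), Dom_reprocess_adjacency_matrix A c cluster_id → Pre_reprocess_adjacency_matrix A c cluster_id → Spec_reprocess_adjacency_matrix A c cluster_id (reprocess_adjacency_matrix A c cluster_id)

-- ===== LEMMAS AND PROOFS =====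

-- the ordered list of cluster members (B's `ind`; also A's ind after its first loop)
def clIdx (c : List Int) (cluster_id : Int) : List Int :=
  ((PySem.List.enumerate c).filter (fun iv => iv.2 == cluster_id)).map (fun iv => iv.1)

theorem clIdx_pairwise (cs : List Int) (cid : Int) : (clIdx cs cid).Pairwise (· < ·) := by
  unfold clIdx
  exact List.Pairwise.map _ (fun a b h => h) ((PySem.List.pairwise_lt_enumerate cs 0).filter _)

theorem mem_clIdx (cs : List Int) (cid x : Int) :
    x ∈ clIdx cs cid ↔ 0 ≤ x ∧ x.toNat < cs.length ∧ cs.getD x.toNat 0 = cid := by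
  unfold clIdx
  simp only [List.mem_map, List.mem_filter, PySem.List.mem_enumerate_iff]
  constructor
  · rintro ⟨⟨a, b⟩, ⟨⟨k, hk, hp⟩, hb⟩, hx⟩
    simp only [Prod.mk.injEq] at hp
    obtain ⟨ha, hbv⟩ := hp
    subst ha hbv hx
    simp only [beq_iff_eq] at hb
    refine ⟨by positivity, by simpa using hk, ?_⟩
    rw [List.getD_eq_getElem cs 0 (by simpa using hk)]
    simpa using hb
  · rintro ⟨hx0, hk, hc⟩
    refine ⟨(x, cs[x.toNat]), ⟨⟨x.toNat, hk, by simp [hx0]⟩, ?_⟩, rfl⟩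
    rw [List.getD_eq_getElem cs 0 hk] at hc
    simpa using hc

theorem sorted_mem_drop (l : List Int) (hp : l.Pairwise (· < ·)) (a : Nat) (ha : a < l.length) (x : Int) :
    x ∈ l.drop a ↔ x ∈ l ∧ l[a] ≤ x := by
  have hmono : ∀ i j : Nat, (hi : i < l.length) → (hj : j < l.length) → i < j → l[i] < l[j] :=
    fun i j hi hj hij => (List.pairwise_iff_getElem.mp hp) i j hi hj hij
  constructor
  · intro hx
    refine ⟨List.mem_of_mem_drop hx, ?_⟩
    obtain ⟨m, hm, hval⟩ := List.getElem_of_mem hx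
    have hm' : a + m < l.length := by simp only [List.length_drop] at hm; omega
    rw [List.getElem_drop] at hval
    subst hval
    rcases Nat.eq_zero_or_pos m with h0 | h0
    · simp [h0]
    · exact le_of_lt (hmono a (a + m) ha hm' (by omega))
  · rintro ⟨hmem, hle⟩
    obtain ⟨m, hm, rfl⟩ := List.getElem_of_mem hmem
    by_cases hma : m < a
    · exact absurd hle (not_le.mpr (hmono m a hm ha hma))
    · have : l[m] = (l.drop a)[m - a]'(by simp only [List.length_drop]; omega) := by
        rw [List.getElem_drop]; congr 1; omega
      rw [this]; exact List.getElem_mem _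

-- two strictly increasing lists with the same members are equal
theorem sorted_ext (l₁ l₂ : List Int) (h1 : l₁.Pairwise (· < ·)) (h2 : l₂.Pairwise (· < ·))
    (h : ∀ x, x ∈ l₁ ↔ x ∈ l₂) : l₁ = l₂ :=
  List.Perm.eq_of_pairwise (fun _ _ _ _ ha hb => le_antisymm ha hb)
    (h1.imp le_of_lt) (h2.imp le_of_lt)
    ((List.perm_ext_iff_of_nodup (h1.imp (fun h => ne_of_lt h)) (h2.imp (fun h => ne_of_lt h))).mpr h)

-- in a strictly increasing list, .index of the k-th element is k
theorem index?_getElem_sorted (l : List Int) (hp : l.Pairwise (· < ·)) (k : Nat) (hk : k < l.length) :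
    PySem.List.index? l l[k] = some k := by
  rw [PySem.List.index?_eq_some_iff]
  refine ⟨l.take k, l.drop (k + 1), ?_, by simp [hk.le], ?_⟩
  · rw [List.getElem_cons_drop, List.take_append_drop]
  · intro hv
    obtain ⟨m, hm, hval⟩ := List.getElem_of_mem hv
    have hmk : m < k := by simp [List.length_take] at hm; omega
    rw [List.getElem_take] at hval
    exact absurd hval (ne_of_lt ((List.pairwise_iff_getElem.mp hp) m k (by omega) hk hmk))

theorem flatMap_enumerate {α β : Type} (xs : List α) (s : Int) (g : α → List β) :
    (PySem.List.enumerate xs s).flatMap (fun ai => g ai.2) = xs.flatMap g := by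
  induction xs generalizing s with
  | nil => simp [PySem.List.enumerate_nil]
  | cons x xs ih => simp [PySem.List.enumerate_cons, ih]

-- shape of B's double loop
theorem loopB (l : List (Int × Int)) (n : Int) (F : Int × Int → Int → Bool) (init : List (List Int)) :
    l.foldl (fun li ai => (PySem.List.pyRange ai.1 n 1).foldl
      (fun li b => if F ai b then li ++ [[ai.1, b]] else li) li) init
    = init ++ l.flatMap (fun ai => ((PySem.List.pyRange ai.1 n 1).filter (F ai)).map (fun b => [ai.1, b])) := by
  simp only [PySem.List.foldl_append_if]
  exact PySem.List.foldl_append_eq_flatMap _ l init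

theorem portB_shape (A : List (List Int)) (c : List Int) (cid : Int) :
    reprocess_adjacency_matrix_alt A c cid =
      (PySem.List.enumerate (clIdx c cid)).flatMap (fun ai =>
        ((PySem.List.pyRange ai.1 (PySem.List.len (clIdx c cid)) 1).filter
          (fun b => decide (PySem.List.pyGetD (clIdx c cid) b 0 <
                      PySem.List.len (PySem.List.pyGetD A ai.2 [])) &&
            (PySem.List.pyGetD (PySem.List.pyGetD A ai.2 [])
              (PySem.List.pyGetD (clIdx c cid) b 0) 0 == 1))).map
          (fun b => [ai.1, b])) := by
  have h : reprocess_adjacency_matrix_alt A c cid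
      = (PySem.List.enumerate (clIdx c cid)).foldl
          (fun li ai => (PySem.List.pyRange ai.1 (PySem.List.len (clIdx c cid)) 1).foldl
            (fun li b => if (decide (PySem.List.pyGetD (clIdx c cid) b 0 < PySem.List.len (PySem.List.pyGetD A ai.2 [])) && (PySem.List.pyGetD (PySem.List.pyGetD A ai.2 []) (PySem.List.pyGetD (clIdx c cid) b 0) 0 == 1)) then li ++ [[ai.1, b]] else li) li) [] := rfl
  rw [h, loopB]
  simp

-- shape of A's first pass (pair-state fold)
theorem loopA (q : Int × Int → Bool) (G : Int → List (Int × Int)) (P : Int → Int × Int → Bool)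
    (l : List (Int × Int)) (li0 : List (List Int)) (ind0 : List Int) :
    l.foldl (fun (st : List (List Int) × List Int) iv =>
        if q iv then
          ((G iv.1).foldl (fun li je => if P iv.1 je then li ++ [[iv.1, je.1]] else li) st.1,
           st.2 ++ [iv.1])
        else st) (li0, ind0)
    = (li0 ++ (l.filter q).flatMap (fun iv => ((G iv.1).filter (P iv.1)).map (fun je => [iv.1, je.1])),
       ind0 ++ (l.filter q).map (fun iv => iv.1)) := by
  induction l generalizing li0 ind0 with
  | nil => simp
  | cons x xs ih =>
    by_cases hq : q x
    · simp only [List.foldl_cons, hq, if_pos, List.filter_cons_of_pos hq]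
      rw [PySem.List.foldl_append_if, ih]
      simp
    · simp only [List.foldl_cons, hq, if_neg, List.filter_cons_of_neg hq, ih, Bool.false_eq_true,
        not_false_iff]

theorem portA_shape (A : List (List Int)) (c : List Int) (cid : Int) :
    reprocess_adjacency_matrix A c cid =
      ((clIdx c cid).flatMap (fun i =>
        ((PySem.List.pyRange 0 (PySem.List.len (PySem.List.pyGetD A i [])) 1).filter
          (fun j => decide (j ≥ i) && (PySem.List.pyGetD c j 0 == cid) &&
            (PySem.List.pyGetD (PySem.List.pyGetD A i []) j 0 == 1))).map
          (fun j => [i, j]))).map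
        (fun l => [(((PySem.List.index? (clIdx c cid) (PySem.List.pyGetD l 0 0)).getD 0 : Nat) : Int),
                   (((PySem.List.index? (clIdx c cid) (PySem.List.pyGetD l 1 0)).getD 0 : Nat) : Int)]) := by
  have h : reprocess_adjacency_matrix A c cid
      = (let st := (PySem.List.enumerate c).foldl
          (fun (st : List (List Int) × List Int) iv =>
            if (fun iv : Int × Int => iv.2 == cid) iv then
              ((PySem.List.enumerate (PySem.List.pyGetD A iv.1 [])).foldl
                (fun li je =>
                  if (fun i (je : Int × Int) => decide (je.1 ≥ i) && (PySem.List.pyGetD c je.1 0 == cid) && (je.2 == 1)) iv.1 je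
                  then li ++ [[iv.1, je.1]] else li) st.1,
               st.2 ++ [iv.1])
            else st) ([], [])
        st.1.map (fun l =>
          [(((PySem.List.index? st.2 (PySem.List.pyGetD l 0 0)).getD 0 : Nat) : Int),
           (((PySem.List.index? st.2 (PySem.List.pyGetD l 1 0)).getD 0 : Nat) : Int)])) := rfl
  rw [h]
  rw [loopA (fun iv : Int × Int => iv.2 == cid)
      (fun i => PySem.List.enumerate (PySem.List.pyGetD A i []))
      (fun i je => decide (je.1 ≥ i) && (PySem.List.pyGetD c je.1 0 == cid) && (je.2 == 1))
      (PySem.List.enumerate c) [] []]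
  simp only [List.nil_append]
  rw [show ((PySem.List.enumerate c).filter (fun iv : Int × Int => iv.2 == cid)).map (fun iv => iv.1) = clIdx c cid from rfl]
  congr 1
  rw [show clIdx c cid = ((PySem.List.enumerate c).filter (fun iv : Int × Int => iv.2 == cid)).map (fun iv => iv.1) from rfl, List.flatMap_map]
  apply List.flatMap_congr
  intro iv _
  rw [PySem.List.enumerate_eq_map_pyRange (PySem.List.pyGetD A iv.1 []) 0, List.filter_map, List.map_map]
  rfl

-- A's per-member column scan equals B's per-member walk over the later cluster members
theorem jl_eq (row cs : List Int) (cid : Int) (k : Nat) (hk : k < (clIdx cs cid).length)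
    (hrowlen : row.length ≤ cs.length) :
    (PySem.List.pyRange 0 (PySem.List.len row) 1).filter
        (fun j => decide (j ≥ (clIdx cs cid)[k]) && (PySem.List.pyGetD cs j 0 == cid) &&
          (PySem.List.pyGetD row j 0 == 1))
      = ((clIdx cs cid).drop k).filter
        (fun j => decide (j < PySem.List.len row) && (PySem.List.pyGetD row j 0 == 1)) := by
  refine sorted_ext _ _
    ((PySem.List.pairwise_lt_pyRange_one 0 (PySem.List.len row)).filter _)
    (((clIdx_pairwise cs cid).sublist (List.drop_sublist k (clIdx cs cid))).filter _) ?_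
  intro x
  rw [List.mem_filter, List.mem_filter,
    sorted_mem_drop (clIdx cs cid) (clIdx_pairwise cs cid) k hk x, mem_clIdx]
  simp only [PySem.List.mem_pyRange_one, PySem.List.len_eq, Bool.and_eq_true, decide_eq_true_eq,
    beq_iff_eq, ge_iff_le]
  have hcx : ∀ y : Int, 0 ≤ y → y.toNat < cs.length →
      (PySem.List.pyGetD cs y 0 = cid ↔ cs.getD y.toNat 0 = cid) := by
    intro y hy0 hylen
    rw [PySem.List.pyGetD_eq_getElem cs 0 hy0 (by omega), List.getD_eq_getElem cs 0 hylen]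
  constructor
  · rintro ⟨⟨hx0, hxr⟩, ⟨hxi, hxc⟩, hx1⟩
    have hxlen : x.toNat < cs.length := by omega
    exact ⟨⟨⟨hx0, hxlen, (hcx x hx0 hxlen).mp hxc⟩, hxi⟩, hxr, hx1⟩
  · rintro ⟨⟨⟨hx0, hxlen, hxc⟩, hxi⟩, hxr, hx1⟩
    exact ⟨⟨hx0, hxr⟩, ⟨hxi, (hcx x hx0 hxlen).mpr hxc⟩, hx1⟩

-- A's reshaped result rewrites into B's reshaped result
theorem main_eq (Amat : List (List Int)) (cs : List Int) (cid : Int)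
    (hpre : ∀ i : Nat, i < cs.length → cs.getD i 0 = cid → i < Amat.length ∧ (Amat.getD i []).length ≤ cs.length) :
    ((clIdx cs cid).flatMap (fun i =>
        ((PySem.List.pyRange 0 (PySem.List.len (PySem.List.pyGetD Amat i [])) 1).filter
          (fun j => decide (j ≥ i) && (PySem.List.pyGetD cs j 0 == cid) &&
            (PySem.List.pyGetD (PySem.List.pyGetD Amat i []) j 0 == 1))).map
          (fun j => [i, j]))).map
        (fun l => [(((PySem.List.index? (clIdx cs cid) (PySem.List.pyGetD l 0 0)).getD 0 : Nat) : Int),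
                   (((PySem.List.index? (clIdx cs cid) (PySem.List.pyGetD l 1 0)).getD 0 : Nat) : Int)])
    = (PySem.List.enumerate (clIdx cs cid)).flatMap (fun ai =>
        ((PySem.List.pyRange ai.1 (PySem.List.len (clIdx cs cid)) 1).filter
          (fun b => decide (PySem.List.pyGetD (clIdx cs cid) b 0 <
                      PySem.List.len (PySem.List.pyGetD Amat ai.2 [])) &&
            (PySem.List.pyGetD (PySem.List.pyGetD Amat ai.2 [])
              (PySem.List.pyGetD (clIdx cs cid) b 0) 0 == 1))).map
          (fun b => [ai.1, b])) := by
  rw [List.map_flatMap, ← flatMap_enumerate (clIdx cs cid) 0]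
  apply List.flatMap_congr
  rintro ai hai
  rw [PySem.List.mem_enumerate_iff] at hai
  obtain ⟨k, hk, rfl⟩ := hai
  simp only [zero_add]
  have hmem := (mem_clIdx cs cid _).mp (List.getElem_mem hk)
  obtain ⟨hi0, hilen, hic⟩ := hmem
  obtain ⟨hiA, hrowlen⟩ := hpre _ hilen hic
  have hrow : PySem.List.pyGetD Amat (clIdx cs cid)[k] [] = Amat.getD ((clIdx cs cid)[k]).toNat [] := by
    rw [PySem.List.pyGetD_eq_getElem Amat [] hi0 (by omega), List.getD_eq_getElem Amat [] hiA]
  rw [List.map_map, jl_eq _ cs cid k hk (by rw [hrow]; exact hrowlen)]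
  have hdrop : (clIdx cs cid).drop k
      = (PySem.List.pyRange (k : Int) (PySem.List.len (clIdx cs cid)) 1).map
          (fun j => PySem.List.pyGetD (clIdx cs cid) j 0) := by
    rw [PySem.List.map_pyGetD_pyRange (clIdx cs cid) 0 (by positivity)]
    simp
  rw [hdrop, List.filter_map, List.map_map]
  apply List.map_congr_left
  intro b hb
  have hbr := PySem.List.mem_pyRange_one.mp (List.mem_of_mem_filter hb)
  have hb0 : (0 : Int) ≤ b := le_trans (by positivity) hbr.1
  have hblen : b.toNat < (clIdx cs cid).length := by
    simp only [PySem.List.len_eq] at hbr; omega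
  have hgetv : PySem.List.pyGetD (clIdx cs cid) b 0 = (clIdx cs cid)[b.toNat] :=
    PySem.List.pyGetD_eq_getElem _ 0 hb0 (by omega)
  simp only [Function.comp_apply]
  have h0 : PySem.List.pyGetD [(clIdx cs cid)[k], PySem.List.pyGetD (clIdx cs cid) b 0] 0 0
      = (clIdx cs cid)[k] := by simp [pysem]
  have h1 : PySem.List.pyGetD [(clIdx cs cid)[k], PySem.List.pyGetD (clIdx cs cid) b 0] 1 0
      = PySem.List.pyGetD (clIdx cs cid) b 0 := by simp [pysem]
  rw [h0, h1, hgetv, index?_getElem_sorted _ (clIdx_pairwise cs cid) k hk,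
    index?_getElem_sorted _ (clIdx_pairwise cs cid) b.toNat hblen]
  simp [hb0]

-- ===== VERDICT (by name: the statement is the Claim_ definition above) =====
theorem reprocess_adjacency_matrix_spec : Claim_equal_reprocess_adjacency_matrix := by
  intro A c cluster_id _ hpre
  unfold Spec_reprocess_adjacency_matrix
  rw [portA_shape, portB_shape]
  exact main_eq A c cluster_id hpre
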